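-- pv_equiv track=rewrite | github.com/caidongyun/agent-security-skill-scanner | release/v2.0.1-preview/whitelist/remote_analyzer.py | _detect_function
-- ===== SOURCE A (Python) =====
-- from typing import Dict, List, Optional, Any
--
-- def _detect_function(lines: List[str], line_number: int) -> Optional[str]:
--     """检测当前函数名"""
--     for i in range(line_number, -1, -1):
--         line = lines[i]
--         if line.strip().startswith('def '):
--             # 提取函数名
--             parts = line.split('def ')
--             if len(parts) > 1:
--                 func_name = parts[1].split('(')[0]
--                 return func_name
--     return None
-- ===== SOURCE B (Python) =====
-- from typing import Dict, List, Optional, Any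
--
-- def _detect_function(lines: List[str], line_number: int) -> Optional[str]:
--     """Forward scan keeping the last 'def ' seen up to line_number."""
--     result = None
--     for i in range(line_number + 1):
--         line = lines[i]
--         if line.strip().startswith('def '):
--             parts = line.split('def ')
--             if len(parts) > 1:
--                 result = parts[1].split('(')[0]
--     return result
-- ===== Notes on version B (the rewrite author's own statement) =====
-- stated objective: alternative
-- what changed: Replaces the backward scan with early return by a single forward pass over lines[0..line_number] that keeps the last matching def name in an accumulator.
import Mathlib
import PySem

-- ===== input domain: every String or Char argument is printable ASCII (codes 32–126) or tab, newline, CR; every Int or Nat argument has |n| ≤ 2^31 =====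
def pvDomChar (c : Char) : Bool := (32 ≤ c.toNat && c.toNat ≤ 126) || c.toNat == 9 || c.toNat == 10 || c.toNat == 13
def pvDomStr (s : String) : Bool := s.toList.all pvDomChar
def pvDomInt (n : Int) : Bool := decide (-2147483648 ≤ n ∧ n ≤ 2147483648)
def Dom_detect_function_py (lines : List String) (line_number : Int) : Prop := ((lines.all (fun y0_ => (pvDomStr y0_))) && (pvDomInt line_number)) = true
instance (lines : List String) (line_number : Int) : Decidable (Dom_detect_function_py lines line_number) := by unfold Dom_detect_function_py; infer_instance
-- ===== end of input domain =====

-- B replaces A's backward scan with early return by a forward pass keeping the last match; objective: alternative (same cost).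

-- ===== PORT A =====
-- parts[1].split('(')[0] (shared verbatim by both Pythons)
def pvExtractName (s : String) : String :=
  ((PySem.Str.split? s "(").getD []).headD ""

-- A's loop: for i in range(line_number, -1, -1), early return on the first match
def pvALoop (lines : List String) : List Int → Option String
  | [] => none
  | i :: rest =>
    match PySem.List.pyGet? lines i with
    | none => none     -- IndexError: excluded by Pre_
    | some line =>
      if PySem.Str.startswith (PySem.Str.strip line) "def " then
        match PySem.Str.split? line "def " with
        | some parts =>
          if 1 < parts.length then some (pvExtractName (parts.getD 1 ""))
          else pvALoop lines rest
        | none => pvALoop lines rest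
      else pvALoop lines rest

def detect_function_py (lines : List String) (line_number : Int) : Option String :=
  pvALoop lines (PySem.List.pyRange line_number (-1) (-1))

-- ===== PORT B =====
-- forward fold over range(line_number + 1), accumulator result := last match so far
def detect_function_py_alt (lines : List String) (line_number : Int) : Option String :=
  (PySem.List.pyRange 0 (line_number + 1) 1).foldl
    (fun result i =>
      match PySem.List.pyGet? lines i with
      | none => result     -- IndexError: excluded by Pre_
      | some line =>
        if PySem.Str.startswith (PySem.Str.strip line) "def " then
          match PySem.Str.split? line "def " with
          | some parts =>
            if 1 < parts.length then some (pvExtractName (parts.getD 1 ""))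
            else result
          | none => result
        else result)
    none

-- ===== PRECONDITION & SPEC =====
-- Pre_ excludes exactly line_number ≥ len(lines), where A (and B) raise IndexError.
def Pre_detect_function_py (lines : List String) (line_number : Int) : Prop :=
  line_number < (lines.length : Int)
instance (lines : List String) (line_number : Int) : Decidable (Pre_detect_function_py lines line_number) := by unfold Pre_detect_function_py; infer_instance

def pvWitness_detect_function_py : List String × Int := (["def f(x):"], 0)

def Spec_detect_function_py (lines : List String) (line_number : Int) (out : Option String) : Prop := out = detect_function_py_alt lines line_number
instance (lines : List String) (line_number : Int) (out : Option String) : Decidable (Spec_detect_function_py lines line_number out) := by unfold Spec_detect_function_py; infer_instance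

-- ===== CLAIM (what is proved, stated in full; the proofs are below) =====
def Claim_equal_detect_function_py : Prop := ∀ (lines : List String) (line_number : Int), Dom_detect_function_py lines line_number → Pre_detect_function_py lines line_number → Spec_detect_function_py lines line_number (detect_function_py lines line_number)

-- ===== LEMMAS AND PROOFS =====

-- the common per-line step
def pvF (line : String) : Option String :=
  if PySem.Str.startswith (PySem.Str.strip line) "def " then
    match PySem.Str.split? line "def " with
    | some parts =>
      if 1 < parts.length then some (pvExtractName (parts.getD 1 ""))
      else none
    | none => none
  else none

-- first match, scanning left to right
def pvFirst : List String → Option String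
  | [] => none
  | l :: r => match pvF l with | some v => some v | none => pvFirst r

theorem pvFirst_append (xs ys : List String) :
    pvFirst (xs ++ ys) = match pvFirst xs with | some v => some v | none => pvFirst ys := by
  induction xs with
  | nil => simp [pvFirst]
  | cons l r ih =>
    simp only [List.cons_append, pvFirst, ih]
    cases pvF l <;> simp

-- B's fold keeping the last match equals the first match of the reversed list
theorem pvFoldl_eq_first_rev (ls : List String) (acc : Option String) :
    ls.foldl (fun r l => match pvF l with | some v => some v | none => r) acc
      = match pvFirst ls.reverse with | some v => some v | none => acc := by
  induction ls generalizing acc with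
  | nil => simp [pvFirst]
  | cons l r ih =>
    simp only [List.foldl_cons, ih, List.reverse_cons, pvFirst_append]
    cases pvFirst r.reverse <;> cases h : pvF l <;> simp [pvFirst, h]

theorem pvALoop_cons (lines : List String) (i : Int) (rest : List Int) (line : String)
    (h : PySem.List.pyGet? lines i = some line) :
    pvALoop lines (i :: rest)
      = match pvF line with | some v => some v | none => pvALoop lines rest := by
  simp only [pvALoop, h, pvF]
  split_ifs with h1
  · cases hs : PySem.Str.split? line "def " with
    | none => simp
    | some parts => by_cases h2 : 1 < parts.length <;> simp [h2]
  · simp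

theorem pvALoop_eq_first (lines : List String) (l : List Int)
    (hv : ∀ i ∈ l, 0 ≤ i ∧ i < (lines.length : Int)) :
    pvALoop lines l = pvFirst (l.map (fun i => lines.getD i.toNat "")) := by
  induction l with
  | nil => simp [pvALoop, pvFirst]
  | cons i rest ih =>
    obtain ⟨h0, hlt⟩ := hv i (List.mem_cons_self ..)
    have hn : i.toNat < lines.length := by omega
    have hg : PySem.List.pyGet? lines i = some (lines.getD i.toNat "") := by
      rw [PySem.List.pyGet?_of_nonneg _ h0]
      simp [List.getD_eq_getElem?_getD, List.getElem?_eq_getElem hn]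
    rw [List.map_cons, pvALoop_cons lines i rest _ hg]
    simp only [pvFirst, ih (fun j hj => hv j (List.mem_cons_of_mem _ hj))]

-- range(0, n) mapped through lines[i] is the prefix lines[:n]
theorem pvRangeMap (lines : List String) (n : Nat) (hn : n ≤ lines.length) :
    (PySem.List.pyRange 0 (n : Int) 1).map (fun i => lines.getD i.toNat "")
      = lines.take n := by
  induction n with
  | zero => simp
  | succ m ih =>
    have hm : m < lines.length := by omega
    have hr : PySem.List.pyRange 0 ((m : Int) + 1) 1
        = PySem.List.pyRange 0 (m : Int) 1 ++ [(m : Int)] :=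
      PySem.List.pyRange_one_succ_right (by positivity)
    have : ((m + 1 : Nat) : Int) = (m : Int) + 1 := by push_cast; ring
    rw [this, hr, List.map_append, ih (by omega), List.take_add_one]
    simp [List.getD_eq_getElem?_getD, List.getElem?_eq_getElem hm]

theorem detect_function_py_spec : Claim_equal_detect_function_py := by
  intro lines line_number _ hpre
  unfold Spec_detect_function_py Pre_detect_function_py at *
  unfold detect_function_py detect_function_py_alt
  by_cases hneg : line_number + 1 ≤ 0
  · rw [PySem.List.pyRange_neg_one_eq_nil (by omega), PySem.List.pyRange_one_eq_nil (by omega)]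
    simp [pvALoop]
  · set n : Nat := (line_number + 1).toNat with hn
    have hcast : ((n : Int)) = line_number + 1 := by omega
    have hnle : n ≤ lines.length := by omega
    have hb : (PySem.List.pyRange 0 (line_number + 1) 1).foldl
        (fun result i =>
          match PySem.List.pyGet? lines i with
          | none => result
          | some line =>
            if PySem.Str.startswith (PySem.Str.strip line) "def " then
              match PySem.Str.split? line "def " with
              | some parts =>
                if 1 < parts.length then some (pvExtractName (parts.getD 1 ""))
                else result
              | none => result
            else result)
        none
        = (lines.take n).foldl (fun r l => match pvF l with | some v => some v | none => r) none := by
      rw [← hcast, ← pvRangeMap lines n hnle, List.foldl_map]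
      apply PySem.List.foldl_congr_mem
      intro acc i hi
      have hmem := (PySem.List.mem_pyRange_one).mp hi
      have h0 : (0:Int) ≤ i := hmem.1
      have hlt : i.toNat < lines.length := by omega
      have hg : PySem.List.pyGet? lines i = some (lines.getD i.toNat "") := by
        rw [PySem.List.pyGet?_of_nonneg _ h0]
        simp [List.getD_eq_getElem?_getD, List.getElem?_eq_getElem hlt]
      rw [hg]
      simp only [pvF]
      split_ifs with h1
      · cases hs : PySem.Str.split? (lines.getD i.toNat "") "def " with
        | none => simp
        | some parts => by_cases h2 : 1 < parts.length <;> simp [h2]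
      · simp
    rw [hb, pvFoldl_eq_first_rev]
    have ha : PySem.List.pyRange line_number (-1) (-1)
        = (PySem.List.pyRange 0 (line_number + 1) 1).reverse := by
      have := PySem.List.pyRange_neg_one_eq_reverse line_number (-1)
      simpa using this
    have hv : ∀ i ∈ (PySem.List.pyRange 0 ((n : Int)) 1).reverse,
        (0:Int) ≤ i ∧ i < (lines.length : Int) := by
      intro i hi
      rw [List.mem_reverse] at hi
      have := (PySem.List.mem_pyRange_one).mp hi
      omega
    rw [ha, ← hcast, pvALoop_eq_first lines _ hv, List.map_reverse,
      pvRangeMap lines n hnle]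
    cases pvFirst (lines.take n).reverse <;> simp
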